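-- pv_equiv track=rewrite | github.com/y-tetsu/math_puzzle | q25.py | himo
-- ===== SOURCE A (Python) =====
-- def himo(pattern, l_hole, r_hole, string):
--     """
--     ひもを結ぶ
--     """
--     # 全部の穴にひもを通した場合、ひもの交点を求める
--     if not l_hole and not r_hole:
--         return cross(string[:] + [(1, 0)])  # 右上の穴にひもを通しておく
--
--     max_num = 0
--
--     # 右の穴へひもを通す
--     if pattern == 0:
--         for i in r_hole:
--             next_string = string[:] + [i]
--             next_rh = r_hole[:]
--             next_rh.remove(i)
--             max_num = max(max_num, himo(1, l_hole, next_rh, next_string))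
--
--     # 左の穴へひもを通す
--     elif pattern == 1:
--         for i in l_hole:
--             next_string = string[:] + [i]
--             next_lh = l_hole[:]
--             next_lh.remove(i)
--             max_num = max(max_num, himo(0, next_lh, r_hole, next_string))
--
--     return max_num
--
-- def cross(string):
--     """
--     ひもの交点を返す
--     """
--     ret = 0
--
--     for i in range(len(string) - 2):
--         sx1, sy1 = string[i][0], string[i][1]
--         ex1, ey1 = string[i + 1][0], string[i + 1][1]
--
--         for j in range(i + 1, len(string) - 1):
--             sx2, sy2 = string[j][0], string[j][1]
--             ex2, ey2 = string[j + 1][0], string[j + 1][1]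
--
--             ret += check([sx1, sy1, ex1, ey1], [sx2, sy2, ex2, ey2])
--
--     return ret
--
-- def check(st1, st2):
--     """
--     交点があるか判定する
--     """
--     cond1 = (st1[0] == st2[0] and st1[2] == st2[2] and st1[1] > st2[1] and st1[3] < st2[3])
--     cond2 = (st1[0] == st2[0] and st1[2] == st2[2] and st1[1] < st2[1] and st1[3] > st2[3])
--     cond3 = (st1[0] == st2[2] and st1[2] == st2[0] and st1[1] > st2[3] and st1[3] < st2[1])
--     cond4 = (st1[0] == st2[2] and st1[2] == st2[0] and st1[1] < st2[3] and st1[3] > st2[1])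
--
--     if cond1 or cond2 or cond3 or cond4:
--         return 1
--
--     return 0
-- ===== SOURCE B (Python) =====
-- def himo(pattern, l_hole, r_hole, string):
--     """
--     Iterative DFS over an explicit stack instead of recursion; crossing test
--     done on coordinate pairs with a sign (product) test instead of 4-lists.
--     """
--     max_num = 0
--     stack = [(pattern, l_hole, r_hole, string)]
--     while stack:
--         p, lh, rh, s = stack.pop()
--         if not lh and not rh:
--             max_num = max(max_num, _cross(s + [(1, 0)]))
--         elif p == 0:
--             for i in rh:
--                 stack.append((1, lh, _drop_first(rh, i), s + [i]))
--         elif p == 1: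
--             for i in lh:
--                 stack.append((0, _drop_first(lh, i), rh, s + [i]))
--     return max_num
--
--
-- def _drop_first(xs, v):
--     """xs without its first occurrence of v (xs is not mutated)."""
--     k = xs.index(v)
--     return xs[:k] + xs[k + 1:]
--
--
-- def _crosses(p1, q1, p2, q2):
--     """Do segments p1-q1 and p2-q2 (strings between hole rows) cross?"""
--     straight = (p1[0] == p2[0] and q1[0] == q2[0]
--                 and (p1[1] - p2[1]) * (q1[1] - q2[1]) < 0)
--     swapped = (p1[0] == q2[0] and q1[0] == p2[0]
--                and (p1[1] - q2[1]) * (q1[1] - p2[1]) < 0)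
--     return straight or swapped
--
--
-- def _cross(s):
--     n = len(s)
--     return sum(1
--                for i in range(n - 2)
--                for j in range(i + 1, n - 1)
--                if _crosses(s[i], s[i + 1], s[j], s[j + 1]))
-- ===== Notes on version B (the rewrite author's own statement) =====
-- stated objective: alternative
-- what changed: The recursive backtracking of himo is replaced by an iterative DFS over an explicit stack of (pattern, l_hole, r_hole, string) states with a running max accumulator, and the crossing test is a sign-of-product comparison on coordinate pairs instead of building 4-element lists and four explicit conjunctions.
import Mathlib
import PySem

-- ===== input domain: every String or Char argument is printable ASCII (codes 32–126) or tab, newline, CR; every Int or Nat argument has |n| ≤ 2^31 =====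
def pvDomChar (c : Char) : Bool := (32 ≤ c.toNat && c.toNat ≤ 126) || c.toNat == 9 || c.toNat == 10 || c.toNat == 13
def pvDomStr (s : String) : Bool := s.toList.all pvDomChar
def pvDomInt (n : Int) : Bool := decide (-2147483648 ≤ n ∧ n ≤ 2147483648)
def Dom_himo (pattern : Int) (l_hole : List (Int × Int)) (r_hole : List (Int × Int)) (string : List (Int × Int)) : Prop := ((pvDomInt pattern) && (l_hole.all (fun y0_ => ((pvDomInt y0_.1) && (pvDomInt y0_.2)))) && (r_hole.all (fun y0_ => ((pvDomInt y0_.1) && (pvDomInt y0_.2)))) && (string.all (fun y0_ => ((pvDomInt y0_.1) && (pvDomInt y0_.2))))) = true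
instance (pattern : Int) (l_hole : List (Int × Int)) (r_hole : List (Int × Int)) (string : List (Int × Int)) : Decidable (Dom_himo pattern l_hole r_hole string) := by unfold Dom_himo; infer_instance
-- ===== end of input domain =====

-- B replaces A's recursive backtracking by an explicit-stack iterative DFS and tests
-- segment crossings by a sign-of-product formula on coordinate pairs (objective:
-- alternative structure, same cost); return values are equal on all inputs.

-- ===== PORT A =====

-- check(st1, st2): st1/st2 are the 4-element lists [sx, sy, ex, ey]; all indices 0..3
-- are always in range, so the pyGetD default 0 is never used.
def checkA (st1 st2 : List Int) : Int :=
  let cond1 := PySem.List.pyGetD st1 0 0 = PySem.List.pyGetD st2 0 0 ∧ PySem.List.pyGetD st1 2 0 = PySem.List.pyGetD st2 2 0 ∧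
               PySem.List.pyGetD st1 1 0 > PySem.List.pyGetD st2 1 0 ∧ PySem.List.pyGetD st1 3 0 < PySem.List.pyGetD st2 3 0
  let cond2 := PySem.List.pyGetD st1 0 0 = PySem.List.pyGetD st2 0 0 ∧ PySem.List.pyGetD st1 2 0 = PySem.List.pyGetD st2 2 0 ∧
               PySem.List.pyGetD st1 1 0 < PySem.List.pyGetD st2 1 0 ∧ PySem.List.pyGetD st1 3 0 > PySem.List.pyGetD st2 3 0
  let cond3 := PySem.List.pyGetD st1 0 0 = PySem.List.pyGetD st2 2 0 ∧ PySem.List.pyGetD st1 2 0 = PySem.List.pyGetD st2 0 0 ∧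
               PySem.List.pyGetD st1 1 0 > PySem.List.pyGetD st2 3 0 ∧ PySem.List.pyGetD st1 3 0 < PySem.List.pyGetD st2 1 0
  let cond4 := PySem.List.pyGetD st1 0 0 = PySem.List.pyGetD st2 2 0 ∧ PySem.List.pyGetD st1 2 0 = PySem.List.pyGetD st2 0 0 ∧
               PySem.List.pyGetD st1 1 0 < PySem.List.pyGetD st2 3 0 ∧ PySem.List.pyGetD st1 3 0 > PySem.List.pyGetD st2 1 0
  if cond1 ∨ cond2 ∨ cond3 ∨ cond4 then 1 else 0

-- cross(string): double loop over index ranges; all string[i]/string[i+1]/string[j]/string[j+1]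
-- accesses are in range for those ranges, so pyGetD's default (0,0) is never used.
def crossA (string : List (Int × Int)) : Int :=
  (PySem.List.pyRange 0 ((string.length : Int) - 2) 1).foldl (fun ret i =>
    let s1 := PySem.List.pyGetD string i (0, 0)
    let e1 := PySem.List.pyGetD string (i + 1) (0, 0)
    (PySem.List.pyRange (i + 1) ((string.length : Int) - 1) 1).foldl (fun ret2 j =>
      let s2 := PySem.List.pyGetD string j (0, 0)
      let e2 := PySem.List.pyGetD string (j + 1) (0, 0)
      ret2 + checkA [s1.1, s1.2, e1.1, e1.2] [s2.1, s2.2, e2.1, e2.2]) ret) 0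

-- needed by himo's termination proof (named here so the port can cite it)
theorem pvRemoveLen {xs : List (Int × Int)} {v : Int × Int} (h : v ∈ xs) :
    ((PySem.List.remove? xs v).getD []).length + 1 = xs.length := by
  rw [PySem.List.remove?_eq_some_erase xs v h, Option.getD_some, List.length_erase_of_mem h]
  have := List.length_pos_of_mem h
  omega

-- himo: literal port of A. next_rh.remove(i) is PySem.List.remove? (i is always a member,
-- so the .getD [] default is never used); the for-loops accumulating max are foldl over
-- the (attached) hole list.
def himo (pattern : Int) (l_hole : List (Int × Int)) (r_hole : List (Int × Int)) (string : List (Int × Int)) : Int :=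
  if l_hole = [] ∧ r_hole = [] then crossA (string ++ [(1, 0)])
  else if pattern = 0 then
    r_hole.attach.foldl (fun max_num i =>
      max max_num (himo 1 l_hole ((PySem.List.remove? r_hole i.1).getD []) (string ++ [i.1]))) 0
  else if pattern = 1 then
    l_hole.attach.foldl (fun max_num i =>
      max max_num (himo 0 ((PySem.List.remove? l_hole i.1).getD []) r_hole (string ++ [i.1]))) 0
  else 0
termination_by l_hole.length + r_hole.length
decreasing_by
  · have := pvRemoveLen i.2; omega
  · have := pvRemoveLen i.2; omega

-- ===== PORT B =====

-- _crosses(p1, q1, p2, q2) from Source B: sign-of-product crossing test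
def crossesB (p1 q1 p2 q2 : Int × Int) : Bool :=
  (p1.1 == p2.1 && q1.1 == q2.1 && decide ((p1.2 - p2.2) * (q1.2 - q2.2) < 0)) ||
  (p1.1 == q2.1 && q1.1 == p2.1 && decide ((p1.2 - q2.2) * (q1.2 - p2.2) < 0))

-- _cross(s) from Source B: sum(1 for i … for j … if _crosses(…)); the inner conditional count
-- is countP, the outer sum a map-sum.  All indices of both ranges are in range.
def crossB (s : List (Int × Int)) : Int :=
  ((PySem.List.pyRange 0 ((s.length : Int) - 2) 1).map (fun i =>
    (((PySem.List.pyRange (i + 1) ((s.length : Int) - 1) 1).countP (fun j =>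
      crossesB (PySem.List.pyGetD s i (0, 0)) (PySem.List.pyGetD s (i + 1) (0, 0))
               (PySem.List.pyGetD s j (0, 0)) (PySem.List.pyGetD s (j + 1) (0, 0)))) : Int))).sum

-- needed by himoRun's termination proof (named here so the port can cite it)
theorem pvChildSum {α : Type} (xs : List α) (g : α → Nat) (n : Nat)
    (hg : ∀ i ∈ xs, g i = Nat.factorial n) (hlen : xs.length ≤ n) :
    (xs.map g).sum < Nat.factorial (n + 1) := by
  rw [List.map_congr_left hg, List.map_const', List.sum_replicate, smul_eq_mul,
    Nat.factorial_succ]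
  have h1 := Nat.factorial_pos n
  have h2 : xs.length < n + 1 := by omega
  exact Nat.mul_lt_mul_of_lt_of_le h2 le_rfl (by omega)

-- the while-stack loop of Source B (_drop_first(xs, v) = xs minus the first occurrence of v
-- = List.erase; its index/slice form is exact since v ∈ xs at every call).  The Lean
-- list's HEAD is the END of the Python list (the top of the stack): stack.pop() takes
-- the head, and extending with children c0..ck leaves ck on top, i.e. prepends the
-- REVERSED children list.
def himoRun (stack : List (Int × List (Int × Int) × List (Int × Int) × List (Int × Int))) (max_num : Int) : Int :=
  match stack with
  | [] => max_num
  | (p, lh, rh, s) :: rest =>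
    if lh = [] ∧ rh = [] then
      himoRun rest (max max_num (crossB (s ++ [(1, 0)])))
    else if p = 0 then
      himoRun ((rh.map (fun i => ((1 : Int), lh, rh.erase i, s ++ [i]))).reverse ++ rest) max_num
    else if p = 1 then
      himoRun ((lh.map (fun i => ((0 : Int), lh.erase i, rh, s ++ [i]))).reverse ++ rest) max_num
    else
      himoRun rest max_num
termination_by (stack.map (fun st => Nat.factorial (st.2.1.length + st.2.2.1.length + 1))).sum
decreasing_by
  · have := Nat.factorial_pos (lh.length + rh.length + 1); simp; omega
  · simp only [List.map_append, List.sum_append, List.map_reverse, List.sum_reverse,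
      List.map_map, List.map_cons, List.sum_cons]
    refine Nat.add_lt_add_right ?_ _
    refine pvChildSum _ _ (lh.length + rh.length) ?_ ?_
    · intro x _
      have hpos := List.length_pos_of_mem x.2
      have hlen := List.length_erase_of_mem x.2
      simp only [Function.comp_apply]
      rw [hlen]
      congr 1
      omega
    · rw [List.length_attach]
      omega
  · simp only [List.map_append, List.sum_append, List.map_reverse, List.sum_reverse,
      List.map_map, List.map_cons, List.sum_cons]
    refine Nat.add_lt_add_right ?_ _
    refine pvChildSum _ _ (lh.length + rh.length) ?_ ?_
    · intro x _
      have hpos := List.length_pos_of_mem x.2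
      have hlen := List.length_erase_of_mem x.2
      simp only [Function.comp_apply]
      rw [hlen]
      congr 1
      omega
    · rw [List.length_attach]
      omega
  · have := Nat.factorial_pos (lh.length + rh.length + 1); simp; omega

def himo_alt (pattern : Int) (l_hole : List (Int × Int)) (r_hole : List (Int × Int)) (string : List (Int × Int)) : Int :=
  himoRun [(pattern, l_hole, r_hole, string)] 0

-- ===== PRECONDITION & SPEC =====
def Spec_himo (pattern : Int) (l_hole : List (Int × Int)) (r_hole : List (Int × Int)) (string : List (Int × Int)) (out : Int) : Prop := out = himo_alt pattern l_hole r_hole string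
instance (pattern : Int) (l_hole : List (Int × Int)) (r_hole : List (Int × Int)) (string : List (Int × Int)) (out : Int) : Decidable (Spec_himo pattern l_hole r_hole string out) := by unfold Spec_himo; infer_instance

-- ===== CLAIM (what is proved, stated in full; the proofs are below) =====
def Claim_equal_himo : Prop := ∀ (pattern : Int) (l_hole : List (Int × Int)) (r_hole : List (Int × Int)) (string : List (Int × Int)), Dom_himo pattern l_hole r_hole string → Spec_himo pattern l_hole r_hole string (himo pattern l_hole r_hole string)

-- ===== LEMMAS AND PROOFS =====

-- attach-map of a match-lambda is a plain map (used to read himoRun's recursive calls)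
theorem pvAttachMap {α β : Type} (l : List α) (f : α → β) :
    (l.attach.map (fun x => match x with | ⟨i, _⟩ => f i)) = l.map f :=
  (List.map_congr_left (fun x _ => by cases x; rfl)).trans List.attach_map_val

-- the A-side value of one stack state
def himoSt (st : Int × List (Int × Int) × List (Int × Int) × List (Int × Int)) : Int :=
  himo st.1 st.2.1 st.2.2.1 st.2.2.2

-- per-pair equivalence of the two crossing tests
theorem check_eq (p1 q1 p2 q2 : Int × Int) :
    checkA [p1.1, p1.2, q1.1, q1.2] [p2.1, p2.2, q2.1, q2.2] =
      if crossesB p1 q1 p2 q2 then 1 else 0 := by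
  obtain ⟨a1, b1⟩ := p1; obtain ⟨c1, d1⟩ := q1
  obtain ⟨a2, b2⟩ := p2; obtain ⟨c2, d2⟩ := q2
  have key : ((a1 = a2 ∧ c1 = c2 ∧ b1 > b2 ∧ d1 < d2) ∨ (a1 = a2 ∧ c1 = c2 ∧ b1 < b2 ∧ d1 > d2) ∨
      (a1 = c2 ∧ c1 = a2 ∧ b1 > d2 ∧ d1 < b2) ∨ (a1 = c2 ∧ c1 = a2 ∧ b1 < d2 ∧ d1 > b2)) ↔
      crossesB (a1, b1) (c1, d1) (a2, b2) (c2, d2) = true := by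
    simp [crossesB, mul_neg_iff]
    omega
  simp [checkA, PySem.List.pyGetD, PySem.List.pyGet?, PySem.List.pyIdx?, key]

theorem cross_eq (s : List (Int × Int)) : crossA s = crossB s := by
  unfold crossA crossB
  simp only [PySem.List.foldl_add, zero_add]
  apply congrArg List.sum
  apply List.map_congr_left
  intro i _
  rw [List.map_congr_left (fun j _ => check_eq _ _ _ _)]
  exact PySem.List.sum_map_ite_one_zero _ _

theorem crossB_nonneg (s : List (Int × Int)) : 0 ≤ crossB s := by
  unfold crossB
  apply List.sum_nonneg
  intro x hx
  simp only [List.mem_map] at hx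
  obtain ⟨i, _, rfl⟩ := hx
  exact Int.natCast_nonneg _

-- generic facts about the max-accumulating fold
theorem foldl_max_shift {α : Type} (f : α → Int) (L : List α) (a b : Int) :
    L.foldl (fun m x => max m (f x)) (max a b) = max a (L.foldl (fun m x => max m (f x)) b) := by
  induction L generalizing a b with
  | nil => simp
  | cons x L ih => simp only [List.foldl_cons, max_assoc]; exact ih a (max b (f x))

theorem foldl_max_reverse {α : Type} (f : α → Int) (L : List α) (a : Int) :
    L.reverse.foldl (fun m x => max m (f x)) a = L.foldl (fun m x => max m (f x)) a := by
  induction L generalizing a with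
  | nil => rfl
  | cons x L ih =>
    simp only [List.reverse_cons, List.foldl_append, List.foldl_cons, List.foldl_nil, ih]
    rw [show max a (f x) = max (f x) a from max_comm _ _, foldl_max_shift]
    exact max_comm _ _

theorem le_foldl_max {α : Type} (f : α → Int) (L : List α) (a : Int) :
    a ≤ L.foldl (fun m x => max m (f x)) a := by
  induction L generalizing a with
  | nil => simp
  | cons x L ih => exact le_trans (le_max_left a (f x)) (ih (max a (f x)))

theorem himo_nonneg (p : Int) (l r s : List (Int × Int)) : 0 ≤ himo p l r s := by
  rw [himo]
  split
  · rw [cross_eq]; exact crossB_nonneg _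
  · split
    · exact le_foldl_max _ _ 0
    · split
      · exact le_foldl_max _ _ 0
      · exact le_refl 0

-- one non-leaf step of A, as a plain fold over the hole list
theorem himo_unfold_r (lh rh s : List (Int × Int)) (hne : ¬(lh = [] ∧ rh = [])) :
    himo 0 lh rh s = rh.foldl (fun m i => max m (himo 1 lh (rh.erase i) (s ++ [i]))) 0 := by
  rw [himo, if_neg hne, if_pos rfl]
  have h1 := List.foldl_attach (l := rh)
    (f := fun m i => max m (himo 1 lh ((PySem.List.remove? rh i).getD []) (s ++ [i]))) (b := 0)
  exact h1.trans (PySem.List.foldl_congr_mem _ _ _ _ (fun acc i hi => by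
    rw [PySem.List.remove?_eq_some_erase rh i hi, Option.getD_some]))

theorem himo_unfold_l (lh rh s : List (Int × Int)) (hne : ¬(lh = [] ∧ rh = [])) :
    himo 1 lh rh s = lh.foldl (fun m i => max m (himo 0 (lh.erase i) rh (s ++ [i]))) 0 := by
  rw [himo, if_neg hne, if_neg one_ne_zero, if_pos rfl]
  have h1 := List.foldl_attach (l := lh)
    (f := fun m i => max m (himo 0 ((PySem.List.remove? lh i).getD []) rh (s ++ [i]))) (b := 0)
  exact h1.trans (PySem.List.foldl_congr_mem _ _ _ _ (fun acc i hi => by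
    rw [PySem.List.remove?_eq_some_erase lh i hi, Option.getD_some]))

-- main invariant: the stack loop folds A's value over the pending states
theorem himoRun_eq (stack : List (Int × List (Int × Int) × List (Int × Int) × List (Int × Int)))
    (acc : Int) :
    0 ≤ acc → himoRun stack acc = stack.foldl (fun m st => max m (himoSt st)) acc := by
  induction stack, acc using himoRun.induct with
  | case1 acc => intro _; simp [himoRun]
  | case2 acc p lh rh s rest hleaf ih =>
    intro hacc
    rw [himoRun, if_pos hleaf, ih (le_trans hacc (le_max_left _ _)), List.foldl_cons]
    have : himoSt (p, lh, rh, s) = crossB (s ++ [(1, 0)]) := by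
      simp only [himoSt]; rw [himo, if_pos hleaf, cross_eq]
    rw [this]
  | case3 acc lh rh s rest hne ih =>
    intro hacc
    rw [himoRun, if_neg hne, if_pos rfl]
    rw [pvAttachMap rh (fun i => ((1 : Int), lh, rh.erase i, s ++ [i]))] at ih
    rw [ih hacc, List.foldl_append, List.foldl_cons]
    congr 1
    rw [foldl_max_reverse himoSt, List.foldl_map]
    simp only [himoSt]
    rw [himo_unfold_r lh rh s hne]
    have hshift := foldl_max_shift (fun i => himo 1 lh (rh.erase i) (s ++ [i])) rh acc 0
    rw [max_eq_left hacc] at hshift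
    exact hshift
  | case4 acc lh rh s rest hne _ ih =>
    intro hacc
    rw [himoRun, if_neg hne, if_neg one_ne_zero, if_pos rfl]
    rw [pvAttachMap lh (fun i => ((0 : Int), lh.erase i, rh, s ++ [i]))] at ih
    rw [ih hacc, List.foldl_append, List.foldl_cons]
    congr 1
    rw [foldl_max_reverse himoSt, List.foldl_map]
    simp only [himoSt]
    rw [himo_unfold_l lh rh s hne]
    have hshift := foldl_max_shift (fun i => himo 0 (lh.erase i) rh (s ++ [i])) lh acc 0
    rw [max_eq_left hacc] at hshift
    exact hshift
  | case5 acc p lh rh s rest hne hp hp1 ih =>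
    intro hacc
    rw [himoRun, if_neg hne, if_neg hp, if_neg hp1, ih hacc, List.foldl_cons]
    have : himoSt (p, lh, rh, s) = 0 := by
      simp only [himoSt]; rw [himo, if_neg hne, if_neg hp, if_neg hp1]
    rw [this, max_eq_left hacc]

-- ===== VERDICT (by name: the statement is the Claim_ definition above) =====
theorem himo_spec : Claim_equal_himo := by
  intro p l r s _
  unfold Spec_himo himo_alt
  rw [himoRun_eq _ 0 le_rfl]
  simp only [List.foldl_cons, List.foldl_nil, himoSt]
  rw [max_eq_right (himo_nonneg p l r s)]
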